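-- pv_equiv track=rewrite | github.com/colby72/taltech_labs | cryptography/assign1/breakVigenere.py | clusterLetter
-- ===== SOURCE A (Python) =====
-- def letterGroups(cryptogram, n):
--     groups = []
--     for i in range(n):
--         group = []
--         for j in range(len(cryptogram)):
--             if j%n==i:
--                 group.append(cryptogram[j])
--         groups.append(group)
--     return groups
--
-- def clusterLetter(cryptogram, n):
--     groups = letterGroups(cryptogram, n)
--     clusters = []
--     for g in groups:
--         cluster = dict()
--         for l in g:
--             if l in cluster.keys():
--                 cluster[l] += 1
--             else:
--                 cluster[l] = 1
--         clusters.append(cluster)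
--     return clusters
-- ===== SOURCE B (Python) =====
-- def clusterLetter(cryptogram, n):
--     if n <= 0:
--         return []
--     clusters = [dict() for _ in range(n)]
--     for j, l in enumerate(cryptogram):
--         d = clusters[j % n]
--         d[l] = d.get(l, 0) + 1
--     return clusters
-- ===== Notes on version B (the rewrite author's own statement) =====
-- stated objective: alternative
-- what changed: Instead of n passes over the whole string (one per residue class, each filtering by j%n==i and then counting), B makes a single pass over the string, distributing each character directly into the counter dict of group j%n (O(n+L) work vs A's O(n*L)); measured running time was not verifiably faster on the generated inputs.
import Mathlib
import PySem

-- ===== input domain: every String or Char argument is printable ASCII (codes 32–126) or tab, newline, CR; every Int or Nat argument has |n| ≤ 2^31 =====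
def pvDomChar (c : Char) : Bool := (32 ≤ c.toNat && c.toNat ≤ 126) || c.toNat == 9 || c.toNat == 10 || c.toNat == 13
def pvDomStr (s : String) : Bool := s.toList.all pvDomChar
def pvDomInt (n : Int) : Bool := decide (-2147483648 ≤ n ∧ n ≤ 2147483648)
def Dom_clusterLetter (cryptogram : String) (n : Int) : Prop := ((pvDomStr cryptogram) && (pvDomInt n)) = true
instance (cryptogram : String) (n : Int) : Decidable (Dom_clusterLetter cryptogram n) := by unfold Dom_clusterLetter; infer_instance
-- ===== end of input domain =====

-- B replaces A's n filtering passes over the string (one per residue class, then a counting pass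
-- per group) by a single pass that distributes each character into the counter dict of group j%n.

-- the Python string as its list of length-1 strings (Python indexing/iteration yields 1-char strings)
def pvChars (cryptogram : String) : List String := cryptogram.toList.map (fun c => String.ofList [c])

-- ===== PORT A =====
def pvLetterGroups (cryptogram : String) (n : Int) : List (List String) :=
  (PySem.List.pyRange 0 n 1).foldl (fun groups i =>
    let group := (PySem.List.pyRange 0 (PySem.Str.len cryptogram) 1).foldl
      (fun group j => if PySem.Int.mod j n == i then group ++ [PySem.List.pyGetD (pvChars cryptogram) j ""] else group)
      ([] : List String)
    groups ++ [group]) []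

def clusterLetter (cryptogram : String) (n : Int) : List (List (String × Int)) :=
  (pvLetterGroups cryptogram n).foldl (fun clusters g =>
    let cluster := g.foldl (fun d l =>
      if d.contains l then d.insert l (d.getD l 0 + 1) else d.insert l 1)
      (PySem.Dict.empty : PySem.Dict String Int)
    clusters ++ [cluster.items]) []

-- ===== PORT B =====
def clusterLetter_alt (cryptogram : String) (n : Int) : List (List (String × Int)) :=
  if n ≤ 0 then []
  else
    ((PySem.List.enumerate (pvChars cryptogram) 0).foldl
      (fun ds p => ds.modify (PySem.Int.mod p.1 n).toNat
        (fun d => d.insert p.2 (d.getD p.2 0 + 1)))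
      ((List.range n.toNat).map (fun _ => (PySem.Dict.empty : PySem.Dict String Int)))).map
      PySem.Dict.items

-- ===== PRECONDITION & SPEC =====
def Spec_clusterLetter (cryptogram : String) (n : Int) (out : List (List (String × Int))) : Prop := out = clusterLetter_alt cryptogram n
instance (cryptogram : String) (n : Int) (out : List (List (String × Int))) : Decidable (Spec_clusterLetter cryptogram n out) := by unfold Spec_clusterLetter; infer_instance

-- ===== CLAIM (what is proved, stated in full; the proofs are below) =====
def Claim_equal_clusterLetter : Prop := ∀ (cryptogram : String) (n : Int), Dom_clusterLetter cryptogram n → Spec_clusterLetter cryptogram n (clusterLetter cryptogram n)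

-- ===== LEMMAS AND PROOFS =====

-- the counting step of both programs, as one function
def pvStep (d : PySem.Dict String Int) (l : String) : PySem.Dict String Int :=
  d.insert l (d.getD l 0 + 1)

lemma pvStepA_eq (d : PySem.Dict String Int) (l : String) :
    (if d.contains l then d.insert l (d.getD l 0 + 1) else d.insert l 1) = pvStep d l := by
  unfold pvStep
  by_cases h : d.contains l = true
  · simp [h]
  · simp only [Bool.not_eq_true] at h
    simp [h, PySem.Dict.getD_of_not_contains]

-- A in closed form: one counted group per residue class i ∈ range(n)
lemma clusterLetter_eq_map (cryptogram : String) (n : Int) :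
    clusterLetter cryptogram n =
      (PySem.List.pyRange 0 n 1).map (fun i =>
        (((PySem.List.enumerate (pvChars cryptogram) 0).filter
            (fun p => PySem.Int.mod p.1 n == i)).foldl
          (fun d p => pvStep d p.2) PySem.Dict.empty).items) := by
  have hlen : PySem.Str.len cryptogram = PySem.List.len (pvChars cryptogram) := by
    simp [pvChars, PySem.Str.len_eq, PySem.List.len_eq]
  unfold clusterLetter pvLetterGroups
  simp only [PySem.List.foldl_append_singleton_eq_map, List.nil_append, List.map_map,
    PySem.List.foldl_append_if, hlen]
  refine List.map_congr_left (fun i _ => ?_)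
  rw [PySem.List.enumerate_eq_map_pyRange (pvChars cryptogram) ""]
  simp only [Function.comp_def, List.filter_map, List.foldl_map, pvStepA_eq]

-- distributing updates over a list of accumulators, read back at index k
lemma foldl_modify_getElem? {α β : Type} (idx : β → Nat) (upd : β → α → α) :
    ∀ (ps : List β) (ds : List α) (k : Nat),
      (ps.foldl (fun ds p => ds.modify (idx p) (upd p)) ds)[k]? =
        (ds[k]?).map (fun a => (ps.filter (fun p => idx p == k)).foldl (fun a p => upd p a) a) := by
  intro ps
  induction ps with
  | nil => intro ds k; simp
  | cons p ps ih =>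
    intro ds k
    simp only [List.foldl_cons, List.filter_cons]
    rw [ih]
    by_cases h : idx p = k
    · subst h
      simp [Option.map_map, Function.comp_def]
    · simp [h]

-- ===== VERDICT (by name: the statement is the Claim_ definition above) =====
theorem clusterLetter_spec : Claim_equal_clusterLetter := by
  intro cryptogram n _
  unfold Spec_clusterLetter clusterLetter_alt
  rw [clusterLetter_eq_map]
  by_cases hn : n ≤ 0
  · rw [if_pos hn, PySem.List.pyRange_one_eq_nil (by omega : n ≤ (0:Int))]
    simp
  · rw [if_neg hn]
    have hn' : (0:Int) < n := by omega
    apply List.ext_getElem?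
    intro k
    rw [List.getElem?_map, List.getElem?_map,
      foldl_modify_getElem? (fun p : Int × String => (PySem.Int.mod p.1 n).toNat)
        (fun (p : Int × String) (d : PySem.Dict String Int) => d.insert p.2 (d.getD p.2 0 + 1))]
    by_cases hk : k < n.toNat
    · rw [PySem.List.getElem?_pyRange_one, if_pos (show k < (n - 0).toNat by omega),
        List.getElem?_map, List.getElem?_range hk]
      simp only [Option.map_some]
      have hfil : List.filter (fun p => PySem.Int.mod p.1 n == ((0:Int) + (k:Int)))
            (PySem.List.enumerate (pvChars cryptogram)) =
          List.filter (fun p : Int × String => (PySem.Int.mod p.1 n).toNat == k)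
            (PySem.List.enumerate (pvChars cryptogram)) := by
        refine List.filter_congr ?_
        intro p hp
        rcases (PySem.List.mem_enumerate_iff _ _ _).mp hp with ⟨k', hk', rfl⟩
        have h0 : 0 ≤ PySem.Int.mod ((0:Int) + (k':Int)) n := PySem.Int.mod_nonneg _ hn'
        rw [Bool.eq_iff_iff]
        simp only [beq_iff_eq]
        omega
      simp only [pvStep, hfil]
    · have h1 : (PySem.List.pyRange 0 n 1)[k]? = none := by
        rw [List.getElem?_eq_none_iff, PySem.List.length_pyRange_one]
        omega
      have h2 : ((List.range n.toNat).map
          (fun _ => (PySem.Dict.empty : PySem.Dict String Int)))[k]? = none := by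
        rw [List.getElem?_eq_none_iff]
        simpa using Nat.le_of_not_lt hk
      rw [h1, h2]
      rfl
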